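-- pv_equiv track=rewrite | github.com/Shwetha-75/CodingProblems-leetcode_-_HackerRank | FrequencyQueris.py | findQuery
-- ===== SOURCE A (Python) =====
-- def findQuery(query):
--     #result array
--     array=[]
--     dict1={}#insertion deletion updation on query
--     for i in query:
--         if i[0]==1:#insertion
--             if i[1] not in dict1: dict1[i[1]]=1
--             else: dict1[i[1]]+=1
--         if i[0]==2:#deletion of frequency by 1 if key exists and value>0
--             if i[1] in dict1:
--                 if dict1[i[1]]>0:
--                     dict1[i[1]]-=1
--
--         if i[0]==3: #apppend 1 to array if frequency found in key or else 0
--             if i[1] in dict1.values():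
--                 array.append(1)
--             else: array.append(0)
--     return array
-- ===== SOURCE B (Python) =====
-- def findQuery(query):
--     freq = {}   # value -> its current frequency
--     cnt = {}    # frequency -> how many distinct values currently have it
--     out = []
--     for q in query:
--         op = q[0]
--         if op == 1:
--             v = q[1]
--             f = freq.get(v, 0)
--             if v in freq:
--                 cnt[f] = cnt[f] - 1
--             freq[v] = f + 1
--             cnt[f + 1] = cnt.get(f + 1, 0) + 1
--         elif op == 2:
--             v = q[1]
--             f = freq.get(v)
--             if f is not None and f > 0:
--                 cnt[f] = cnt[f] - 1
--                 freq[v] = f - 1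
--                 cnt[f - 1] = cnt.get(f - 1, 0) + 1
--         elif op == 3:
--             out.append(1 if cnt.get(q[1], 0) > 0 else 0)
--     return out
-- ===== Notes on version B (the rewrite author's own statement) =====
-- stated objective: alternative
-- what changed: B additionally maintains a count-of-frequencies dict and answers a type-3 query by a single lookup in it instead of A's scan over dict1.values().
import Mathlib
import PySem

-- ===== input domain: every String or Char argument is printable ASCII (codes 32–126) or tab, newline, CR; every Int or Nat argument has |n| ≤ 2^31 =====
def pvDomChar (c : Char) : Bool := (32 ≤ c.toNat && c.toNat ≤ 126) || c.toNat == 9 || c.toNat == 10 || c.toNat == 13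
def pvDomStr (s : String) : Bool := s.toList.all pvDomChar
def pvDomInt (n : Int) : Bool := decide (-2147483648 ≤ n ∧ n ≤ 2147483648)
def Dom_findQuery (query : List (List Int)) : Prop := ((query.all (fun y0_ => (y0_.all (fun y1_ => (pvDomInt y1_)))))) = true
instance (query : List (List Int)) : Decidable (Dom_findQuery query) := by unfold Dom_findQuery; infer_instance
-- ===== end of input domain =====

-- B additionally maintains a count-of-frequencies dict and answers a type-3 query by a
-- single lookup in it instead of A's scan over dict1.values() (a different algorithm).

-- ===== PORT A =====
-- one loop iteration of A: state is (array, dict1); i[0]/i[1] via pyGet? (Pre_ guarantees they exist where read)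
def findQueryStepA (st : List Int × PySem.Dict Int Int) (i : List Int) :
    List Int × PySem.Dict Int Int :=
  let i0 := (PySem.List.pyGet? i 0).getD 0
  let st :=
    if i0 = 1 then
      let i1 := (PySem.List.pyGet? i 1).getD 0
      if st.2.contains i1 = false then (st.1, st.2.insert i1 1)
      else (st.1, st.2.insert i1 (st.2.getD i1 0 + 1))
    else st
  let st :=
    if i0 = 2 then
      let i1 := (PySem.List.pyGet? i 1).getD 0
      if st.2.contains i1 then
        if st.2.getD i1 0 > 0 then (st.1, st.2.insert i1 (st.2.getD i1 0 - 1)) else st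
      else st
    else st
  if i0 = 3 then
    let i1 := (PySem.List.pyGet? i 1).getD 0
    if st.2.values.contains i1 then (st.1 ++ [1], st.2) else (st.1 ++ [0], st.2)
  else st

def findQuery (query : List (List Int)) : List Int :=
  (query.foldl findQueryStepA ([], PySem.Dict.empty)).1

-- ===== PORT B =====
-- one loop iteration of B: state is (out, freq, cnt); cnt[f] is read with getD
-- (exact here: B's invariant guarantees the key is present where Python indexes cnt[f])
def findQueryStepB (st : List Int × PySem.Dict Int Int × PySem.Dict Int Int) (q : List Int) :
    List Int × PySem.Dict Int Int × PySem.Dict Int Int :=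
  let op := (PySem.List.pyGet? q 0).getD 0
  if op = 1 then
    let v := (PySem.List.pyGet? q 1).getD 0
    let f := st.2.1.getD v 0
    let cnt := if st.2.1.contains v then st.2.2.insert f (st.2.2.getD f 0 - 1) else st.2.2
    (st.1, st.2.1.insert v (f + 1), cnt.insert (f + 1) (cnt.getD (f + 1) 0 + 1))
  else if op = 2 then
    let v := (PySem.List.pyGet? q 1).getD 0
    match st.2.1.get? v with
    | some f =>
      if f > 0 then
        (st.1, st.2.1.insert v (f - 1),
         (st.2.2.insert f (st.2.2.getD f 0 - 1)).insert (f - 1)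
           ((st.2.2.insert f (st.2.2.getD f 0 - 1)).getD (f - 1) 0 + 1))
      else st
    | none => st
  else if op = 3 then
    let v := (PySem.List.pyGet? q 1).getD 0
    (st.1 ++ [if st.2.2.getD v 0 > 0 then 1 else 0], st.2.1, st.2.2)
  else st

def findQuery_alt (query : List (List Int)) : List Int :=
  (query.foldl findQueryStepB ([], PySem.Dict.empty, PySem.Dict.empty)).1

-- ===== PRECONDITION & SPEC =====
-- Pre_ excludes exactly the inputs where Python A raises IndexError: an empty query row
-- (i[0] fails) or a row of length 1 whose opcode is 1, 2 or 3 (i[1] fails).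
def Pre_findQuery (query : List (List Int)) : Prop :=
  ∀ l ∈ query, l ≠ [] ∧ ((l.headD 0 = 1 ∨ l.headD 0 = 2 ∨ l.headD 0 = 3) → 2 ≤ l.length)
instance (query : List (List Int)) : Decidable (Pre_findQuery query) := by
  unfold Pre_findQuery; infer_instance

def pvWitness_findQuery : List (List Int) := [[1, 5], [3, 1], [2, 5], [3, 1], [3, 0]]

def Spec_findQuery (query : List (List Int)) (out : List Int) : Prop := out = findQuery_alt query
instance (query : List (List Int)) (out : List Int) : Decidable (Spec_findQuery query out) := by
  unfold Spec_findQuery; infer_instance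

-- ===== CLAIM (what is proved, stated in full; the proofs are below) =====
def Claim_equal_findQuery : Prop :=
  ∀ (query : List (List Int)), Dom_findQuery query → Pre_findQuery query →
    Spec_findQuery query (findQuery query)

-- ===== LEMMAS AND PROOFS =====

-- relation between A's state (arr, d) and B's state (out, freq, cnt)
def pvRel (a : List Int × PySem.Dict Int Int)
    (b : List Int × PySem.Dict Int Int × PySem.Dict Int Int) : Prop :=
  a.1 = b.1 ∧ a.2 = b.2.1 ∧ a.2.keys.Nodup ∧
    ∀ x : Int, b.2.2.getD x 0 = (a.2.values.count x : Int)

theorem pvRel_init : pvRel ([], PySem.Dict.empty) ([], PySem.Dict.empty, PySem.Dict.empty) := by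
  refine ⟨rfl, rfl, by simp [PySem.Dict.empty, PySem.Dict.keys], fun x => by
    simp [PySem.Dict.empty, PySem.Dict.getD, PySem.Dict.get?, PySem.Dict.values]⟩

-- replacing the (unique) entry at key v by value w shifts the multiset of values by one
theorem pvCount_replace (l : List (Int × Int)) (v f w x : Int)
    (hnd : (l.map Prod.fst).Nodup) (hmem : (v, f) ∈ l) :
    (((l.map (fun p => if p.1 == v then (v, w) else p)).map Prod.snd).count x : Int) =
      ((l.map Prod.snd).count x : Int)
        - (if x = f then 1 else 0) + (if x = w then 1 else 0) := by
  induction l with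
  | nil => simp at hmem
  | cons hd tl ih =>
    simp only [List.map_cons, List.nodup_cons] at hnd
    by_cases hhd : hd.1 = v
    · have hdeq : hd = (v, f) := by
        rcases List.mem_cons.1 hmem with h | h
        · exact h.symm
        · exact absurd (by simpa [hhd] using List.mem_map_of_mem (f := Prod.fst) h)
            (hhd ▸ hnd.1)
      have htl : tl.map (fun p => if p.1 = v then (v, w) else p) = tl := by
        conv_rhs => rw [← List.map_id tl]
        apply List.map_congr_left
        intro p hp
        have hpv : p.1 ≠ v := by
          intro hpv
          exact (hhd ▸ hnd.1) (by simpa [hpv] using List.mem_map_of_mem (f := Prod.fst) hp)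
        simp [hpv]
      subst hdeq
      simp only [List.map_cons, if_true, beq_iff_eq, htl, List.count_cons]
      push_cast
      split_ifs <;> omega
    · have hmem' : (v, f) ∈ tl := by
        rcases List.mem_cons.1 hmem with h | h
        · exact absurd (by rw [← h]) hhd
        · exact h
      have ihh := ih hnd.2 hmem'
      simp only [beq_iff_eq] at ihh
      simp only [List.map_cons, beq_iff_eq, hhd, if_false, List.count_cons]
      push_cast at ihh ⊢
      split_ifs at ihh ⊢ <;> omega

-- case reductions of one A-step (i0 abbreviates i[0], i1 abbreviates i[1])
theorem pvA1m (arr : List Int) (d : PySem.Dict Int Int) (i : List Int)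
    (h1 : (PySem.List.pyGet? i 0).getD 0 = 1)
    (hc : d.contains ((PySem.List.pyGet? i 1).getD 0) = true) :
    findQueryStepA (arr, d) i =
      (arr, d.insert ((PySem.List.pyGet? i 1).getD 0)
        (d.getD ((PySem.List.pyGet? i 1).getD 0) 0 + 1)) := by
  simp [findQueryStepA, h1, hc]

theorem pvA1f (arr : List Int) (d : PySem.Dict Int Int) (i : List Int)
    (h1 : (PySem.List.pyGet? i 0).getD 0 = 1)
    (hc : d.contains ((PySem.List.pyGet? i 1).getD 0) = false) :
    findQueryStepA (arr, d) i = (arr, d.insert ((PySem.List.pyGet? i 1).getD 0) 1) := by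
  simp [findQueryStepA, h1, hc]

theorem pvA2y (arr : List Int) (d : PySem.Dict Int Int) (i : List Int)
    (h2 : (PySem.List.pyGet? i 0).getD 0 = 2)
    (hc : d.contains ((PySem.List.pyGet? i 1).getD 0) = true)
    (hp : d.getD ((PySem.List.pyGet? i 1).getD 0) 0 > 0) :
    findQueryStepA (arr, d) i =
      (arr, d.insert ((PySem.List.pyGet? i 1).getD 0)
        (d.getD ((PySem.List.pyGet? i 1).getD 0) 0 - 1)) := by
  simp [findQueryStepA, h2, hc, hp]

theorem pvA2n0 (arr : List Int) (d : PySem.Dict Int Int) (i : List Int)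
    (h2 : (PySem.List.pyGet? i 0).getD 0 = 2)
    (hp : ¬ d.getD ((PySem.List.pyGet? i 1).getD 0) 0 > 0) :
    findQueryStepA (arr, d) i = (arr, d) := by
  by_cases hc : d.contains ((PySem.List.pyGet? i 1).getD 0) <;>
    simp [findQueryStepA, h2, hc, hp]

theorem pvA2n (arr : List Int) (d : PySem.Dict Int Int) (i : List Int)
    (h2 : (PySem.List.pyGet? i 0).getD 0 = 2)
    (hc : d.contains ((PySem.List.pyGet? i 1).getD 0) = false) :
    findQueryStepA (arr, d) i = (arr, d) := by
  simp [findQueryStepA, h2, hc]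

theorem pvA3 (arr : List Int) (d : PySem.Dict Int Int) (i : List Int)
    (h3 : (PySem.List.pyGet? i 0).getD 0 = 3) :
    findQueryStepA (arr, d) i =
      (arr ++ [if d.values.contains ((PySem.List.pyGet? i 1).getD 0) then 1 else 0], d) := by
  by_cases hv : ((PySem.List.pyGet? i 1).getD 0) ∈ d.values <;>
    simp [findQueryStepA, h3, hv]

theorem pvA0 (arr : List Int) (d : PySem.Dict Int Int) (i : List Int)
    (h1 : (PySem.List.pyGet? i 0).getD 0 ≠ 1) (h2 : (PySem.List.pyGet? i 0).getD 0 ≠ 2)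
    (h3 : (PySem.List.pyGet? i 0).getD 0 ≠ 3) :
    findQueryStepA (arr, d) i = (arr, d) := by
  simp [findQueryStepA, h1, h2, h3]

-- case reductions of one B-step
theorem pvB1m (out : List Int) (freq cnt : PySem.Dict Int Int) (i : List Int)
    (h1 : (PySem.List.pyGet? i 0).getD 0 = 1)
    (hc : freq.contains ((PySem.List.pyGet? i 1).getD 0) = true) :
    findQueryStepB (out, freq, cnt) i =
      (out, freq.insert ((PySem.List.pyGet? i 1).getD 0)
          (freq.getD ((PySem.List.pyGet? i 1).getD 0) 0 + 1),
        (cnt.insert (freq.getD ((PySem.List.pyGet? i 1).getD 0) 0)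
            (cnt.getD (freq.getD ((PySem.List.pyGet? i 1).getD 0) 0) 0 - 1)).insert
          (freq.getD ((PySem.List.pyGet? i 1).getD 0) 0 + 1)
          ((cnt.insert (freq.getD ((PySem.List.pyGet? i 1).getD 0) 0)
              (cnt.getD (freq.getD ((PySem.List.pyGet? i 1).getD 0) 0) 0 - 1)).getD
            (freq.getD ((PySem.List.pyGet? i 1).getD 0) 0 + 1) 0 + 1)) := by
  simp [findQueryStepB, h1, hc]

theorem pvB1f (out : List Int) (freq cnt : PySem.Dict Int Int) (i : List Int)
    (h1 : (PySem.List.pyGet? i 0).getD 0 = 1)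
    (hc : freq.contains ((PySem.List.pyGet? i 1).getD 0) = false) :
    findQueryStepB (out, freq, cnt) i =
      (out, freq.insert ((PySem.List.pyGet? i 1).getD 0)
          (freq.getD ((PySem.List.pyGet? i 1).getD 0) 0 + 1),
        cnt.insert (freq.getD ((PySem.List.pyGet? i 1).getD 0) 0 + 1)
          (cnt.getD (freq.getD ((PySem.List.pyGet? i 1).getD 0) 0 + 1) 0 + 1)) := by
  simp [findQueryStepB, h1, hc]

theorem pvB2y (out : List Int) (freq cnt : PySem.Dict Int Int) (i : List Int) (f : Int)
    (h2 : (PySem.List.pyGet? i 0).getD 0 = 2)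
    (hg : freq.get? ((PySem.List.pyGet? i 1).getD 0) = some f) (hp : f > 0) :
    findQueryStepB (out, freq, cnt) i =
      (out, freq.insert ((PySem.List.pyGet? i 1).getD 0) (f - 1),
        (cnt.insert f (cnt.getD f 0 - 1)).insert (f - 1)
          ((cnt.insert f (cnt.getD f 0 - 1)).getD (f - 1) 0 + 1)) := by
  simp [findQueryStepB, h2, hg, hp]

theorem pvB2n0 (out : List Int) (freq cnt : PySem.Dict Int Int) (i : List Int) (f : Int)
    (h2 : (PySem.List.pyGet? i 0).getD 0 = 2)
    (hg : freq.get? ((PySem.List.pyGet? i 1).getD 0) = some f) (hp : ¬ f > 0) :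
    findQueryStepB (out, freq, cnt) i = (out, freq, cnt) := by
  simp [findQueryStepB, h2, hg, hp]

theorem pvB2n (out : List Int) (freq cnt : PySem.Dict Int Int) (i : List Int)
    (h2 : (PySem.List.pyGet? i 0).getD 0 = 2)
    (hg : freq.get? ((PySem.List.pyGet? i 1).getD 0) = none) :
    findQueryStepB (out, freq, cnt) i = (out, freq, cnt) := by
  simp [findQueryStepB, h2, hg]

theorem pvB3 (out : List Int) (freq cnt : PySem.Dict Int Int) (i : List Int)
    (h3 : (PySem.List.pyGet? i 0).getD 0 = 3) :
    findQueryStepB (out, freq, cnt) i =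
      (out ++ [if cnt.getD ((PySem.List.pyGet? i 1).getD 0) 0 > 0 then 1 else 0], freq, cnt) := by
  simp [findQueryStepB, h3]

theorem pvB0 (out : List Int) (freq cnt : PySem.Dict Int Int) (i : List Int)
    (h1 : (PySem.List.pyGet? i 0).getD 0 ≠ 1) (h2 : (PySem.List.pyGet? i 0).getD 0 ≠ 2)
    (h3 : (PySem.List.pyGet? i 0).getD 0 ≠ 3) :
    findQueryStepB (out, freq, cnt) i = (out, freq, cnt) := by
  simp [findQueryStepB, h1, h2, h3]

-- the count identity after overwriting an existing key v (old value f) with w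
theorem pvCount_insert_over (d : PySem.Dict Int Int) (v f w x : Int)
    (hnd : d.keys.Nodup) (hg : d.get? v = some f) :
    (((d.insert v w).values).count x : Int) =
      (d.values.count x : Int) - (if x = f then 1 else 0) + (if x = w then 1 else 0) := by
  have hc : d.contains v = true := by
    rw [PySem.Dict.contains_eq_isSome_get?, hg]; rfl
  have hval : (d.insert v w).values =
      (d.items.map (fun p => if p.1 == v then (v, w) else p)).map Prod.snd := by
    simp [PySem.Dict.values, PySem.Dict.items_insert_of_contains d w hc]
  rw [hval,
    pvCount_replace d.items v f w x hnd (PySem.Dict.mem_items_of_get?_eq_some d hg)]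
  rfl

-- one parallel step preserves the relation
theorem pvStep (a : List Int × PySem.Dict Int Int)
    (b : List Int × PySem.Dict Int Int × PySem.Dict Int Int) (i : List Int)
    (h : pvRel a b) : pvRel (findQueryStepA a i) (findQueryStepB b i) := by
  obtain ⟨harr, hd, hnd, hcnt⟩ := h
  obtain ⟨arr, d⟩ := a
  obtain ⟨out, freq, cnt⟩ := b
  simp only at harr hd hnd hcnt
  subst harr hd
  by_cases h1 : (PySem.List.pyGet? i 0).getD 0 = 1
  · by_cases hc : d.contains ((PySem.List.pyGet? i 1).getD 0)
    · -- insertion, existing key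
      have hget : d.get? ((PySem.List.pyGet? i 1).getD 0) =
          some (d.getD ((PySem.List.pyGet? i 1).getD 0) 0) := by
        rcases hmem : d.get? ((PySem.List.pyGet? i 1).getD 0) with _ | f
        · rw [PySem.Dict.contains_eq_isSome_get?, hmem] at hc; simp at hc
        · simp [PySem.Dict.getD_eq_get?_getD, hmem]
      rw [pvA1m arr d i h1 hc, pvB1m arr d cnt i h1 hc]
      refine ⟨rfl, rfl,
        PySem.Dict.nodup_keys_insert d _ (d.getD ((PySem.List.pyGet? i 1).getD 0) 0 + 1) hnd, ?_⟩
      intro x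
      rw [pvCount_insert_over d ((PySem.List.pyGet? i 1).getD 0)
        (d.getD ((PySem.List.pyGet? i 1).getD 0) 0)
        (d.getD ((PySem.List.pyGet? i 1).getD 0) 0 + 1) x hnd hget]
      rw [PySem.Dict.getD_insert, PySem.Dict.getD_insert, PySem.Dict.getD_insert]
      by_cases hx1 : x = d.getD ((PySem.List.pyGet? i 1).getD 0) 0 + 1 <;>
        by_cases hx2 : x = d.getD ((PySem.List.pyGet? i 1).getD 0) 0 <;>
          simp [hx1, hx2, hcnt] <;> omega
    · -- insertion, fresh key
      have hc' : d.contains ((PySem.List.pyGet? i 1).getD 0) = false := by simpa using hc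
      have hgd : d.getD ((PySem.List.pyGet? i 1).getD 0) 0 = 0 :=
        PySem.Dict.getD_of_not_contains d 0 hc'
      have hval : (d.insert ((PySem.List.pyGet? i 1).getD 0) 1).values = d.values ++ [1] := by
        simp [PySem.Dict.values, PySem.Dict.items_insert_of_not_contains d 1 hc']
      rw [pvA1f arr d i h1 hc', pvB1f arr d cnt i h1 hc', hgd]
      refine ⟨rfl, by norm_num, PySem.Dict.nodup_keys_insert d _ 1 hnd, ?_⟩
      intro x
      rw [PySem.Dict.getD_insert, hval]
      simp only [List.count_append, List.count_singleton]
      by_cases hx : x = (0 : Int) + 1 <;> simp [hx, hcnt] <;> omega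
  · by_cases h2 : (PySem.List.pyGet? i 0).getD 0 = 2
    · rcases hmem : d.get? ((PySem.List.pyGet? i 1).getD 0) with _ | f
      · -- key absent: both no-op
        have hc : d.contains ((PySem.List.pyGet? i 1).getD 0) = false := by
          rw [PySem.Dict.contains_eq_isSome_get?, hmem]; rfl
        rw [pvA2n arr d i h2 hc, pvB2n arr d cnt i h2 hmem]
        exact ⟨rfl, rfl, hnd, hcnt⟩
      · have hc : d.contains ((PySem.List.pyGet? i 1).getD 0) = true := by
          rw [PySem.Dict.contains_eq_isSome_get?, hmem]; rfl
        have hgd : d.getD ((PySem.List.pyGet? i 1).getD 0) 0 = f := by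
          simp [PySem.Dict.getD_eq_get?_getD, hmem]
        by_cases hf : f > 0
        · -- decrement happens
          rw [pvA2y arr d i h2 hc (by rw [hgd]; exact hf), pvB2y arr d cnt i f h2 hmem hf, hgd]
          refine ⟨rfl, rfl, PySem.Dict.nodup_keys_insert d _ (f - 1) hnd, ?_⟩
          intro x
          rw [pvCount_insert_over d ((PySem.List.pyGet? i 1).getD 0) f (f - 1) x hnd hmem]
          rw [PySem.Dict.getD_insert, PySem.Dict.getD_insert, PySem.Dict.getD_insert]
          by_cases hx1 : x = f - 1 <;> by_cases hx2 : x = f <;>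
            simp [hx1, hx2, hcnt] <;> omega
        · -- frequency already 0: both no-op
          rw [pvA2n0 arr d i h2 (by rw [hgd]; exact hf), pvB2n0 arr d cnt i f h2 hmem hf]
          exact ⟨rfl, rfl, hnd, hcnt⟩
    · by_cases h3 : (PySem.List.pyGet? i 0).getD 0 = 3
      · -- frequency query: cnt.getD i1 0 > 0 ↔ i1 ∈ d.values
        rw [pvA3 arr d i h3, pvB3 arr d cnt i h3]
        have hkey : (cnt.getD ((PySem.List.pyGet? i 1).getD 0) 0 > 0) ↔
            (d.values.contains ((PySem.List.pyGet? i 1).getD 0) = true) := by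
          rw [hcnt ((PySem.List.pyGet? i 1).getD 0)]
          constructor
          · intro hp
            have hcp : 0 < d.values.count ((PySem.List.pyGet? i 1).getD 0) := by exact_mod_cast hp
            simpa [List.contains_iff_mem] using List.count_pos_iff.mp hcp
          · intro hm
            have hcp : 0 < d.values.count ((PySem.List.pyGet? i 1).getD 0) :=
              List.count_pos_iff.mpr (by simpa [List.contains_iff_mem] using hm)
            exact_mod_cast hcp
        refine ⟨?_, rfl, hnd, hcnt⟩
        by_cases hv : d.values.contains ((PySem.List.pyGet? i 1).getD 0)
        · rw [if_pos hv, if_pos (hkey.2 hv)]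
        · rw [if_neg hv, if_neg (fun hp => hv (hkey.1 hp))]
      · -- unknown opcode: both no-op
        rw [pvA0 arr d i h1 h2 h3, pvB0 arr d cnt i h1 h2 h3]
        exact ⟨rfl, rfl, hnd, hcnt⟩

theorem pvFold (query : List (List Int)) (a : List Int × PySem.Dict Int Int)
    (b : List Int × PySem.Dict Int Int × PySem.Dict Int Int) (h : pvRel a b) :
    pvRel (query.foldl findQueryStepA a) (query.foldl findQueryStepB b) := by
  induction query generalizing a b with
  | nil => simpa using h
  | cons q qs ih => exact ih _ _ (pvStep a b q h)

-- ===== VERDICT (by name: the statement is the Claim_ definition above) =====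
theorem findQuery_spec : Claim_equal_findQuery := by
  intro query _ _
  unfold Spec_findQuery findQuery findQuery_alt
  exact (pvFold query _ _ pvRel_init).1
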